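-- pv_equiv track=rewrite | github.com/wivien19/python | film.py | dict_kiegeszit
-- ===== SOURCE A (Python) =====
-- def dict_kiegeszit(parameter):
--     lista = []
--     if len(parameter) == 0:
--         return parameter
--     for i in parameter:
--         lista.append(i)
--     for i in range(1, max(lista)):
--         if i not in lista:
--             parameter[i] = 0
--
--     return parameter
-- ===== SOURCE B (Python) =====
-- def dict_kiegeszit(parameter):
--     if not parameter:
--         return parameter
--     # sort the distinct keys once, then emit each gap between consecutive
--     # keys in one sweep (no membership tests at all)
--     prev, gaps = 1, []
--     for k in sorted(set(parameter)):
--         if k > prev: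
--             gaps.extend(range(prev, k))
--         if k + 1 > prev:
--             prev = k + 1
--     for i in gaps:
--         parameter[i] = 0
--     return parameter
-- ===== Notes on version B (the rewrite author's own statement) =====
-- stated objective: faster
-- what changed: Instead of testing every integer in 1..max-1 for membership in the key list, B sorts the distinct keys once and emits the missing keys as the gaps between consecutive sorted keys in a single sweep, with no membership tests at all.
import Mathlib
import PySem

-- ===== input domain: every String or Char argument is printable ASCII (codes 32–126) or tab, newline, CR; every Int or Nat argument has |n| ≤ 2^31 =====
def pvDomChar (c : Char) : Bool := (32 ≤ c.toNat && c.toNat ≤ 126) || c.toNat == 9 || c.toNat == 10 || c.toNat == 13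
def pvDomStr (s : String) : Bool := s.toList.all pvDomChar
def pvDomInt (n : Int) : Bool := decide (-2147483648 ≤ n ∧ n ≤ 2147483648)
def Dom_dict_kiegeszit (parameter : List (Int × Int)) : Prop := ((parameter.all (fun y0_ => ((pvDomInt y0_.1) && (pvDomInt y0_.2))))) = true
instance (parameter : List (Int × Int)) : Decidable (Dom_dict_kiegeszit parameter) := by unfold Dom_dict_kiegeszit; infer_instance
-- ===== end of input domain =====

-- B replaces A's per-integer membership scan over 1..max-1 with a single gap sweep over the
-- sorted distinct keys (alternative algorithm); both mutate the dict argument in place, the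
-- equivalence proved is about the returned association list.

-- ===== PORT A =====
def dict_kiegeszit (parameter : List (Int × Int)) : List (Int × Int) :=
  if parameter.length = 0 then parameter
  else
    let lista := parameter.foldl (fun acc p => acc ++ [p.1]) []
    match PySem.List.max? lista (fun x => x) with
    | none => parameter
    | some m =>
      ((PySem.List.pyRange 1 m 1).foldl
        (fun d i => if i ∉ lista then PySem.Dict.insert d i 0 else d)
        (PySem.Dict.mk parameter)).items

-- ===== PORT B =====
def dict_kiegeszit_alt (parameter : List (Int × Int)) : List (Int × Int) :=
  if parameter = [] then parameter
  else
    let st := (PySem.List.sorted (PySem.Set.ofList (parameter.map Prod.fst)) (fun x => x) false).foldl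
      (fun (s : Int × List Int) k =>
        let s1 := if k > s.1 then (s.1, s.2 ++ PySem.List.pyRange s.1 k 1) else s
        if k + 1 > s1.1 then (k + 1, s1.2) else s1)
      ((1 : Int), ([] : List Int))
    (st.2.foldl (fun d i => PySem.Dict.insert d i 0) (PySem.Dict.mk parameter)).items

-- ===== PRECONDITION & SPEC =====
def Spec_dict_kiegeszit (parameter : List (Int × Int)) (out : List (Int × Int)) : Prop := out = dict_kiegeszit_alt parameter
instance (parameter : List (Int × Int)) (out : List (Int × Int)) : Decidable (Spec_dict_kiegeszit parameter out) := by unfold Spec_dict_kiegeszit; infer_instance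

-- ===== CLAIM (what is proved, stated in full; the proofs are below) =====
def Claim_equal_dict_kiegeszit : Prop := ∀ (parameter : List (Int × Int)), Dom_dict_kiegeszit parameter → Spec_dict_kiegeszit parameter (dict_kiegeszit parameter)

-- ===== LEMMAS AND PROOFS =====

-- last element of a list with a default (proof-side helper)
def pvLastD : List Int → Int → Int
  | [], d => d
  | a :: t, _ => pvLastD t a

theorem pvLastD_mem (ks : List Int) : ∀ (d : Int), ks ≠ [] → pvLastD ks d ∈ ks := by
  induction ks with
  | nil => intro d h; exact absurd rfl h
  | cons k t ih =>
    intro d _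
    cases t with
    | nil => simp [pvLastD]
    | cons b u => exact List.mem_cons_of_mem _ (ih k (by simp))

-- in a strictly increasing list every element is ≤ the last one
theorem pv_le_lastD (ks : List Int) : ∀ (d x : Int), ks.Pairwise (· < ·) → x ∈ ks → x ≤ pvLastD ks d := by
  induction ks with
  | nil => intro d x _ hx; cases hx
  | cons k t ih =>
    intro d x hs hx
    simp only [pvLastD]
    rcases List.mem_cons.mp hx with rfl | hxt
    · cases t with
      | nil => simp [pvLastD]
      | cons b u =>
        have hxb : x < b := (List.pairwise_cons.mp hs).1 b (by simp)
        have hb := ih x b hs.of_cons (by simp)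
        omega
    · exact ih k x hs.of_cons hxt

-- the gap sweep over a strictly increasing list ks whose members are exactly the keys ≥ prev
-- accumulates exactly the filtered range (pyRange prev M).filter (· ∉ keys)
theorem pv_gapScan (keys : List Int) (ks : List Int) :
    ∀ (prev : Int) (gaps : List Int),
    ks.Pairwise (· < ·) →
    (∀ i : Int, prev ≤ i → (i ∈ keys ↔ i ∈ ks)) →
    ks.foldl
      (fun (s : Int × List Int) k =>
        let s1 := if k > s.1 then (s.1, s.2 ++ PySem.List.pyRange s.1 k 1) else s
        if k + 1 > s1.1 then (k + 1, s1.2) else s1)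
      (prev, gaps)
    = (max prev (pvLastD ks (prev - 1) + 1),
       gaps ++ (PySem.List.pyRange prev (max prev (pvLastD ks (prev - 1) + 1)) 1).filter
         (fun i => decide (i ∉ keys))) := by
  induction ks with
  | nil =>
    intro prev gaps _ _
    simp [pvLastD, PySem.List.pyRange_one_eq_nil (le_refl prev)]
  | cons k t ih =>
    intro prev gaps hs hmem
    have hkt : ∀ j ∈ t, k < j := (List.pairwise_cons.mp hs).1
    by_cases hk : prev ≤ k
    · -- k is ≥ prev: emit the gap [prev, k) and advance to k+1
      have hstep :
          (let s1 := if k > (prev, gaps).1 then ((prev, gaps).1, (prev, gaps).2 ++ PySem.List.pyRange (prev, gaps).1 k 1) else (prev, gaps)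
           if k + 1 > s1.1 then (k + 1, s1.2) else s1)
          = ((k + 1 : Int), gaps ++ PySem.List.pyRange prev k 1) := by
        dsimp only
        by_cases hgt : prev < k
        · simp [hgt, show prev < k + 1 by omega]
        · have hke : k = prev := by omega
          simp [hke, PySem.List.pyRange_one_eq_nil (le_refl prev)]
      have hmem' : ∀ i : Int, k + 1 ≤ i → (i ∈ keys ↔ i ∈ t) := by
        intro i hi
        rw [hmem i (by omega), List.mem_cons]
        simp [show i ≠ k by omega]
      rw [List.foldl_cons, hstep, ih (k + 1) (gaps ++ PySem.List.pyRange prev k 1) hs.of_cons hmem']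
      rw [show k + 1 - 1 = k by ring]
      have hkL : k ≤ pvLastD t k := by
        have := pv_le_lastD (k :: t) (prev - 1) k hs (by simp)
        simpa [pvLastD] using this
      have h1 : max (k + 1) (pvLastD t k + 1) = pvLastD t k + 1 := by omega
      have h2 : max prev (pvLastD (k :: t) (prev - 1) + 1) = pvLastD t k + 1 := by
        simp only [pvLastD]; omega
      rw [h1, h2]
      -- split the range at k
      have hsplit : PySem.List.pyRange prev (pvLastD t k + 1) 1
          = PySem.List.pyRange prev k 1 ++ (k :: PySem.List.pyRange (k + 1) (pvLastD t k + 1) 1) := by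
        rw [PySem.List.pyRange_one_append prev k (pvLastD t k + 1) hk (by omega),
            PySem.List.pyRange_one_cons (a := k) (b := pvLastD t k + 1) (by omega)]
      rw [hsplit, List.filter_append, List.filter_cons]
      have hkkeys : k ∈ keys := (hmem k hk).mpr (by simp)
      have hlow : List.filter (fun i => decide (i ∉ keys)) (PySem.List.pyRange prev k 1)
          = PySem.List.pyRange prev k 1 := by
        rw [List.filter_eq_self]
        intro i hi
        have hi' := PySem.List.mem_pyRange_one.mp hi
        have : i ∉ k :: t := by
          intro hmem2
          rcases List.mem_cons.mp hmem2 with rfl | h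
          · omega
          · exact absurd (hkt i h) (by omega)
        simp [ (hmem i hi'.1), this ]
      rw [hlow]
      simp [hkkeys]
    · -- k < prev: the step is a no-op
      have hstep :
          (let s1 := if k > (prev, gaps).1 then ((prev, gaps).1, (prev, gaps).2 ++ PySem.List.pyRange (prev, gaps).1 k 1) else (prev, gaps)
           if k + 1 > s1.1 then (k + 1, s1.2) else s1)
          = ((prev : Int), gaps) := by
        dsimp only
        simp [show ¬ prev < k by omega, show ¬ prev < k + 1 by omega]
      have hmem' : ∀ i : Int, prev ≤ i → (i ∈ keys ↔ i ∈ t) := by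
        intro i hi
        rw [hmem i hi, List.mem_cons]
        simp [show i ≠ k by omega]
      rw [List.foldl_cons, hstep, ih prev gaps hs.of_cons hmem']
      cases t with
      | nil =>
        have : max prev (pvLastD [] (prev - 1) + 1) = max prev (pvLastD [k] (prev - 1) + 1) := by
          simp only [pvLastD]; omega
        rw [this]
      | cons b u => rfl

theorem dict_kiegeszit_eq (parameter : List (Int × Int)) :
    dict_kiegeszit parameter = dict_kiegeszit_alt parameter := by
  by_cases hp : parameter = []
  · simp [dict_kiegeszit, dict_kiegeszit_alt, hp]
  · have hlen : ¬ parameter.length = 0 := by simpa [List.length_eq_zero_iff] using hp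
    simp only [dict_kiegeszit, dict_kiegeszit_alt, if_neg hp, if_neg hlen,
      PySem.List.foldl_append_singleton_eq_map, List.nil_append]
    set keys := parameter.map Prod.fst with hkeys
    have hkne : keys ≠ [] := by simp [hkeys, hp]
    set ks := PySem.List.sorted (PySem.Set.ofList keys) (fun x => x) false with hks
    have hsks : ks.Pairwise (· < ·) := PySem.List.sorted_ofList_pairwise_lt keys
    have hmemks : ∀ i : Int, i ∈ keys ↔ i ∈ ks := by
      intro i; rw [hks, PySem.List.mem_sorted, PySem.Set.mem_ofList]
    cases hm : PySem.List.max? keys (fun x => x) with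
    | none => exact absurd ((PySem.List.max?_eq_none_iff _ _).mp hm) hkne
    | some m =>
      dsimp only
      have hmmem : m ∈ keys := PySem.List.max?_mem hm
      have hmax : ∀ y ∈ keys, y ≤ m := PySem.List.max?_isMax hm
      have hksne : ks ≠ [] := by
        intro h; exact absurd ((hmemks m).mp hmmem) (by simp [h])
      -- the last element of the sorted distinct keys is exactly max(keys)
      have hL : pvLastD ks 0 = m := by
        apply le_antisymm
        · exact hmax _ ((hmemks _).mpr (pvLastD_mem ks 0 hksne))
        · exact pv_le_lastD ks 0 m hsks ((hmemks m).mp hmmem)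
      rw [pv_gapScan keys ks 1 [] hsks (fun i _ => hmemks i)]
      dsimp only
      rw [show (1 : Int) - 1 = 0 by norm_num, hL]
      -- the swept gaps equal A's filtered range
      have hranges : (PySem.List.pyRange 1 (max 1 (m + 1)) 1).filter (fun i => decide (i ∉ keys))
          = (PySem.List.pyRange 1 m 1).filter (fun i => decide (i ∉ keys)) := by
        by_cases hm1 : 1 ≤ m
        · rw [show max 1 (m + 1) = m + 1 by omega,
              PySem.List.pyRange_one_succ_right hm1, List.filter_append]
          simp [hmmem]
        · rw [show max 1 (m + 1) = 1 by omega,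
              PySem.List.pyRange_one_eq_nil (le_refl (1 : Int)),
              PySem.List.pyRange_one_eq_nil (by omega : m ≤ 1)]
      rw [List.nil_append, hranges,
        PySem.List.foldl_ite_eq_foldl_filter
          (p := fun i => i ∉ keys)
          (f := fun d i => PySem.Dict.insert d i 0)]

-- ===== VERDICT (by name: the statement is the Claim_ definition above) =====
theorem dict_kiegeszit_spec : Claim_equal_dict_kiegeszit := by
  intro p _
  exact dict_kiegeszit_eq p
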